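-- pv_equiv track=rewrite | github.com/dongjinhai/ssrmgr | mgr.py | verify_user
-- ===== SOURCE A (Python) =====
-- def verify_user(user):
--     """校验User
--     检查一个user是否符合合法的user结构，如果出现非法的key就删除这个key。
--     :param user: dict类型，用户类型
--     :return: dict
--     """
--     valid_keys = ['d', 'u', 'enable', 'forbidden_port', 'method', 'obfs', 'passwd', 'port', 'protocol',
--                   'protocol_param', 'user']
--     user_keys = list(user.keys())
--     for key in user_keys:
--         if key not in valid_keys:
--             del user[key]
--     return user
-- ===== SOURCE B (Python) =====
-- VALID_KEYS = {'d', 'u', 'enable', 'forbidden_port', 'method', 'obfs', 'passwd', 'port', 'protocol',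
--               'protocol_param', 'user'}
--
-- def verify_user(user):
--     """Keep only whitelisted entries; mutates `user` in place and returns it."""
--     kept = {k: v for k, v in user.items() if k in VALID_KEYS}
--     user.clear()
--     user.update(kept)
--     return user
-- ===== Notes on version B (the rewrite author's own statement) =====
-- stated objective: simpler
-- what changed: B inverts the control flow: instead of listing the keys and deleting each invalid one from the dict, it builds the kept sub-dict with one comprehension over a whitelist set and restores it in place with clear()+update().
import Mathlib
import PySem

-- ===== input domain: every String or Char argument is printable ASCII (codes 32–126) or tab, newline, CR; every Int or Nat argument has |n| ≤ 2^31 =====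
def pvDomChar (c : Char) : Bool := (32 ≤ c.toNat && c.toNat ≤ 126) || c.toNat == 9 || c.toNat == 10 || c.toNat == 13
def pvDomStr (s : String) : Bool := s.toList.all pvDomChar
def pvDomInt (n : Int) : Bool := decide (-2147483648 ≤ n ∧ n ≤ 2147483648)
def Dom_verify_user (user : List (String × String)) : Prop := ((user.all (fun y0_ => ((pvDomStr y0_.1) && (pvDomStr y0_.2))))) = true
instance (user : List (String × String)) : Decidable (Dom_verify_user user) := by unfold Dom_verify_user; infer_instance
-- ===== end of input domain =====

-- B inverts the control flow: one filtering pass keeping whitelisted entries (clear+update in place)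
-- instead of A's list-the-keys-then-delete-each-invalid loop; objective: simpler.
-- Both Pythons mutate `user` in place identically; the theorems are about the returned dict's items.

-- ===== PORT A =====
def pvValidKeys_verify_user : List String :=
  ["d", "u", "enable", "forbidden_port", "method", "obfs", "passwd", "port", "protocol",
   "protocol_param", "user"]

def verify_user (user : List (String × String)) : List (String × String) :=
  let valid_keys := pvValidKeys_verify_user
  let d := PySem.Dict.mk user
  let user_keys := d.keys
  let d := user_keys.foldl (fun d key => if !(valid_keys.contains key) then d.erase key else d) d
  d.items

-- ===== PORT B =====
def verify_user_alt (user : List (String × String)) : List (String × String) :=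
  let valid := PySem.Set.ofList pvValidKeys_verify_user
  -- kept = {k: v for k, v in user.items() if k in VALID_KEYS}; user.clear(); user.update(kept)
  user.filter (fun kv => valid.contains kv.1)

-- ===== PRECONDITION & SPEC =====
def Spec_verify_user (user : List (String × String)) (out : List (String × String)) : Prop := out = verify_user_alt user
instance (user : List (String × String)) (out : List (String × String)) : Decidable (Spec_verify_user user out) := by unfold Spec_verify_user; infer_instance

-- ===== CLAIM (what is proved, stated in full; the proofs are below) =====
def Claim_equal_verify_user : Prop := ∀ (user : List (String × String)), Dom_verify_user user → Spec_verify_user user (verify_user user)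

-- ===== LEMMAS AND PROOFS =====

-- The delete-loop over `ks` leaves exactly the items whose key is valid or never listed in `ks`.
theorem fold_erase_items (V : List String) (ks : List String) (d : PySem.Dict String String) :
    (ks.foldl (fun d key => if !(V.contains key) then d.erase key else d) d).items
      = d.items.filter (fun p => V.contains p.1 || !(ks.contains p.1)) := by
  induction ks generalizing d with
  | nil => simp
  | cons k ks ih =>
    simp only [List.foldl_cons]
    by_cases h : k ∈ V
    · rw [if_neg (by simp [h]), ih]
      apply List.filter_congr
      intro p _
      by_cases hk : p.1 = k <;> simp [hk, h, List.contains_cons]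
    · rw [if_pos (by simp [h]), ih]
      show (PySem.Dict.mk (d.items.filter (fun p => !(p.1 == k)))).items.filter _ = _
      simp only [PySem.Dict.items, List.filter_filter]
      apply List.filter_congr
      intro p _
      by_cases hk : p.1 = k <;> simp [hk, h, List.contains_cons]

-- ===== VERDICT (by name: the statement is the Claim_ definition above) =====
theorem verify_user_spec : Claim_equal_verify_user := by
  intro user _
  show verify_user user = verify_user_alt user
  unfold verify_user verify_user_alt
  simp only []
  rw [fold_erase_items]
  have hset : PySem.Set.ofList pvValidKeys_verify_user = pvValidKeys_verify_user := by decide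
  rw [hset]
  show user.filter _ = user.filter _
  apply List.filter_congr
  intro p hp
  have hmem : (PySem.Dict.mk user).keys.contains p.1 = true := by
    simp [PySem.Dict.keys]
    exact ⟨p.2, hp⟩
  rw [hmem]
  simp
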